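-- pv_equiv track=rewrite | github.com/WhenLifeHandsYouLemons/LED-Light-Wall | pygame_code.py | precomputeWave
-- ===== SOURCE A (Python) =====
-- def precomputeWave(pos, duration):
--     # Pos:
--     #   0 = Up to down
--     #   1 = Right to left
--     #   2 = Down to up
--     #   3 = Left to right
--     if (pos == 0 or pos == 2) and duration > 20:
--         duration = 20
--     if (pos == 1 or pos == 3) and duration > 30:
--         duration = 30
--     precomputed_wave = [[]]
--     if pos == 0:
--         x = 0
--         while x < 30:
--             precomputed_wave[0].append([x, 19])
--             x += 1
--     elif pos == 1:
--         y = 0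
--         while y < 20:
--             precomputed_wave[0].append([29, y])
--             y += 1
--     elif pos == 2:
--         x = 0
--         while x < 30:
--             precomputed_wave[0].append([x, 0])
--             x += 1
--     elif pos == 3:
--         y = 0
--         while y < 20:
--             precomputed_wave[0].append([0, y])
--             y += 1
--
--     for tick in range(0, duration):
--         tick_array = []
--         # Get the previous tick array to calculate next tick
--         previous_tick_array = precomputed_wave[tick]
--
--         # For every LED in the previous tick array
--         for i in previous_tick_array:
--             # Get the separate x and y values to change it
--             i_x = i[0]
--             i_y = i[1]
--
--             if pos == 0:
--                 tick_array.append([i_x, i_y - 1])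
--             elif pos == 1:
--                 tick_array.append([i_x - 1, i_y])
--             elif pos == 2:
--                 tick_array.append([i_x, i_y + 1])
--             elif pos == 3:
--                 tick_array.append([i_x + 1, i_y])
--         # Add tick_array to precomputed_wave
--         precomputed_wave.append(tick_array)
--
--     return precomputed_wave
-- ===== SOURCE B (Python) =====
-- def precomputeWave(pos, duration):
--     # Direct closed form: each tick's line is the base line shifted tick steps.
--     if pos == 0:
--         duration = min(duration, 20); base = [(x, 19) for x in range(30)]; dx, dy = 0, -1
--     elif pos == 2:
--         duration = min(duration, 20); base = [(x, 0) for x in range(30)]; dx, dy = 0, 1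
--     elif pos == 1:
--         duration = min(duration, 30); base = [(29, y) for y in range(20)]; dx, dy = -1, 0
--     elif pos == 3:
--         duration = min(duration, 30); base = [(0, y) for y in range(20)]; dx, dy = 1, 0
--     else:
--         base = []; dx = dy = 0
--     n = max(duration, 0)
--     return [[[x + dx * t, y + dy * t] for (x, y) in base] for t in range(n + 1)]
-- ===== Notes on version B (the rewrite author's own statement) =====
-- stated objective: simpler
-- what changed: B replaces A's tick-by-tick derivation of each line from the previous line (indexing back into the accumulated result) with a closed form: it builds the base line once and emits, for each tick t, the base line shifted by t in the pos direction.
import Mathlib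
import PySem

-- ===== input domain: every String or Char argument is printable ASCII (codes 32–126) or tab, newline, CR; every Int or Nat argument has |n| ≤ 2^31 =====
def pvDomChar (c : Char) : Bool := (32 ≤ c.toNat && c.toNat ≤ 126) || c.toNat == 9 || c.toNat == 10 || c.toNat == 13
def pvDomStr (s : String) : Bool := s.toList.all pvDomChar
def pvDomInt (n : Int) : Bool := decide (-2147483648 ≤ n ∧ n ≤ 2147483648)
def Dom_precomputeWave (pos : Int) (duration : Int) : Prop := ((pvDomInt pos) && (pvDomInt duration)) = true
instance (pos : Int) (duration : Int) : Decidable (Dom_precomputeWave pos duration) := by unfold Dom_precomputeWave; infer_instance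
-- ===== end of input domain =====

-- B replaces A's tick-by-tick derivation of each line from the previous one with a
-- closed form (the base line shifted by t for each tick t); same output, simpler structure.

-- ===== PORT A =====
-- the two duration caps at the top of A
def capDurA (pos : Int) (duration : Int) : Int :=
  let d1 := if (pos == 0 || pos == 2) && decide (duration > 20) then 20 else duration
  if (pos == 1 || pos == 3) && decide (d1 > 30) then 30 else d1

-- the initial-line while loops (counter-driven while ported as a fold over the counter's range)
def baseA (pos : Int) : List (List Int) :=
  if pos == 0 then (PySem.List.pyRange 0 30 1).foldl (fun acc x => acc ++ [[x, 19]]) []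
  else if pos == 1 then (PySem.List.pyRange 0 20 1).foldl (fun acc y => acc ++ [[29, y]]) []
  else if pos == 2 then (PySem.List.pyRange 0 30 1).foldl (fun acc x => acc ++ [[x, 0]]) []
  else if pos == 3 then (PySem.List.pyRange 0 20 1).foldl (fun acc y => acc ++ [[0, y]]) []
  else []

-- the inner for-loop over previous_tick_array (i[0]/i[1] always in range: every element is [x, y])
def shiftA (pos : Int) (prev : List (List Int)) : List (List Int) :=
  prev.foldl (fun acc i =>
    let ix := PySem.List.pyGetD i 0 0
    let iy := PySem.List.pyGetD i 1 0
    if pos == 0 then acc ++ [[ix, iy - 1]]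
    else if pos == 1 then acc ++ [[ix - 1, iy]]
    else if pos == 2 then acc ++ [[ix, iy + 1]]
    else if pos == 3 then acc ++ [[ix + 1, iy]]
    else acc) []

def precomputeWave (pos : Int) (duration : Int) : List (List (List Int)) :=
  let d := capDurA pos duration
  (PySem.List.pyRange 0 d 1).foldl
    (fun wave tick => wave ++ [shiftA pos (PySem.List.pyGetD wave tick [])])
    [baseA pos]

-- ===== PORT B =====
def precomputeWave_alt (pos : Int) (duration : Int) : List (List (List Int)) :=
  let cfg : Int × List (Int × Int) × Int × Int :=
    if pos == 0 then (min duration 20, (PySem.List.pyRange 0 30 1).map (fun x => (x, (19:Int))), 0, -1)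
    else if pos == 2 then (min duration 20, (PySem.List.pyRange 0 30 1).map (fun x => (x, (0:Int))), 0, 1)
    else if pos == 1 then (min duration 30, (PySem.List.pyRange 0 20 1).map (fun y => ((29:Int), y)), -1, 0)
    else if pos == 3 then (min duration 30, (PySem.List.pyRange 0 20 1).map (fun y => ((0:Int), y)), 1, 0)
    else (duration, [], 0, 0)
  match cfg with
  | (dur, base, dx, dy) =>
    let n := max dur 0
    (PySem.List.pyRange 0 (n + 1) 1).map (fun t => base.map (fun p => [p.1 + dx * t, p.2 + dy * t]))

-- ===== PRECONDITION & SPEC =====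
def Spec_precomputeWave (pos : Int) (duration : Int) (out : List (List (List Int))) : Prop := out = precomputeWave_alt pos duration
instance (pos : Int) (duration : Int) (out : List (List (List Int))) : Decidable (Spec_precomputeWave pos duration out) := by unfold Spec_precomputeWave; infer_instance

-- ===== CLAIM (what is proved, stated in full; the proofs are below) =====
def Claim_equal_precomputeWave : Prop := ∀ (pos : Int) (duration : Int), Dom_precomputeWave pos duration → Spec_precomputeWave pos duration (precomputeWave pos duration)

-- ===== LEMMAS AND PROOFS =====

theorem flatten_map_singleton {A B : Type} (f : A -> B) (l : List A) :
    (l.map (fun x => [f x])).flatten = l.map f := by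
  induction l with
  | nil => simp
  | cons a l ih => simp [ih]

-- A's main loop: the wave after n ticks is the list of iterated shifts of the base line
theorem loop_inv (g : List (List Int) → List (List Int)) (base : List (List Int)) (n : Nat) :
    (PySem.List.pyRange 0 (n : Int) 1).foldl
      (fun wave tick => wave ++ [g (PySem.List.pyGetD wave tick [])]) [base]
    = (List.range (n + 1)).map (fun t => g^[t] base) := by
  induction n with
  | zero => simp [PySem.List.pyRange_one_eq_nil]
  | succ n ih =>
    have h : PySem.List.pyRange 0 ((n : Int) + 1) 1
        = PySem.List.pyRange 0 (n : Int) 1 ++ [(n : Int)] :=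
      PySem.List.pyRange_one_succ_right (by positivity)
    push_cast
    rw [h, List.foldl_append, ih]
    have hget : PySem.List.pyGetD ((List.range (n + 1)).map (fun t => g^[t] base)) (n : Int) []
        = g^[n] base := by
      rw [PySem.List.pyGetD_natCast]
      rw [List.getD_eq_getElem _ _ (by simp)]
      simp only [List.getElem_map, List.getElem_range]
    simp only [List.foldl_cons, List.foldl_nil, hget]
    rw [List.range_succ (n := n + 1), List.map_append]
    simp [Function.iterate_succ_apply']

-- shiftA on a line of [x, y] rows, per pos value
theorem shiftA_row (pos dx dy : Int)
    (hb : (pos = 0 ∧ dx = 0 ∧ dy = -1) ∨ (pos = 1 ∧ dx = -1 ∧ dy = 0) ∨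
          (pos = 2 ∧ dx = 0 ∧ dy = 1) ∨ (pos = 3 ∧ dx = 1 ∧ dy = 0))
    (l : List (Int × Int)) :
    shiftA pos (l.map (fun p => [p.1, p.2]))
      = (l.map (fun p => (p.1 + dx, p.2 + dy))).map (fun p => [p.1, p.2]) := by
  rcases hb with ⟨h, hx, hy⟩ | ⟨h, hx, hy⟩ | ⟨h, hx, hy⟩ | ⟨h, hx, hy⟩ <;>
    subst h <;> subst hx <;> subst hy <;>
    simp [shiftA, List.map_map, Function.comp_def, PySem.List.pyGetD,
      flatten_map_singleton, sub_eq_add_neg]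

-- iterating shiftA t times shifts the line by t·(dx, dy)
theorem iter_shift (pos dx dy : Int)
    (hb : (pos = 0 ∧ dx = 0 ∧ dy = -1) ∨ (pos = 1 ∧ dx = -1 ∧ dy = 0) ∨
          (pos = 2 ∧ dx = 0 ∧ dy = 1) ∨ (pos = 3 ∧ dx = 1 ∧ dy = 0))
    (l : List (Int × Int)) (t : Nat) :
    (shiftA pos)^[t] (l.map (fun p => [p.1, p.2]))
      = (l.map (fun p => (p.1 + dx * t, p.2 + dy * t))).map (fun p => [p.1, p.2]) := by
  induction t with
  | zero => simp
  | succ t ih =>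
    rw [Function.iterate_succ_apply', ih, shiftA_row pos dx dy hb]
    congr 1
    rw [List.map_map]
    apply List.map_congr_left
    intro p _
    simp only [Function.comp_def, Prod.mk.injEq]
    push_cast
    constructor <;> ring

-- A's whole computation equals B's closed form, for pos ∈ {0,1,2,3}
theorem main_pos (pos dx dy : Int)
    (hb : (pos = 0 ∧ dx = 0 ∧ dy = -1) ∨ (pos = 1 ∧ dx = -1 ∧ dy = 0) ∨
          (pos = 2 ∧ dx = 0 ∧ dy = 1) ∨ (pos = 3 ∧ dx = 1 ∧ dy = 0))
    (bl : List (Int × Int)) (hbase : baseA pos = bl.map (fun p => [p.1, p.2])) (d : Int) :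
    (PySem.List.pyRange 0 d 1).foldl
      (fun wave tick => wave ++ [shiftA pos (PySem.List.pyGetD wave tick [])]) [baseA pos]
    = (PySem.List.pyRange 0 (max d 0 + 1) 1).map
        (fun t => bl.map (fun p => [p.1 + dx * t, p.2 + dy * t])) := by
  by_cases hd : d ≤ 0
  · rw [PySem.List.pyRange_one_eq_nil hd]
    have hm : max d 0 = 0 := by omega
    rw [hm]
    rw [PySem.List.pyRange_one_singleton]
    simp [hbase]
  · have hdn : d = ((d.toNat : Nat) : Int) := by omega
    rw [hdn, hbase, loop_inv]
    have hm : max ((d.toNat : Nat) : Int) 0 = ((d.toNat : Nat) : Int) := by omega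
    rw [hm]
    have : ((d.toNat : Nat) : Int) + 1 = ((d.toNat + 1 : Nat) : Int) := by push_cast; ring
    rw [this, PySem.List.pyRange_zero_natCast, List.map_map]
    apply List.map_congr_left
    intro t _
    rw [iter_shift pos dx dy hb, List.map_map]
    rfl

theorem base0 : baseA 0 = ((PySem.List.pyRange 0 30 1).map (fun x => (x, (19:Int)))).map (fun p => [p.1, p.2]) := by
  simp [baseA, List.map_map, Function.comp_def, flatten_map_singleton]
theorem base1 : baseA 1 = ((PySem.List.pyRange 0 20 1).map (fun y => ((29:Int), y))).map (fun p => [p.1, p.2]) := by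
  simp [baseA, List.map_map, Function.comp_def, flatten_map_singleton]
theorem base2 : baseA 2 = ((PySem.List.pyRange 0 30 1).map (fun x => (x, (0:Int)))).map (fun p => [p.1, p.2]) := by
  simp [baseA, List.map_map, Function.comp_def, flatten_map_singleton]
theorem base3 : baseA 3 = ((PySem.List.pyRange 0 20 1).map (fun y => ((0:Int), y))).map (fun p => [p.1, p.2]) := by
  simp [baseA, List.map_map, Function.comp_def, flatten_map_singleton]

theorem cap02 (pos d : Int) (h : pos = 0 ∨ pos = 2) : capDurA pos d = min d 20 := by
  rcases h with h | h <;> subst h <;> simp [capDurA] <;> split_ifs <;> omega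
theorem cap13 (pos d : Int) (h : pos = 1 ∨ pos = 3) : capDurA pos d = min d 30 := by
  rcases h with h | h <;> subst h <;> simp [capDurA] <;> split_ifs <;> omega

-- for pos outside 0..3 the inner loop never appends
theorem shiftA_other (pos : Int) (h0 : pos ≠ 0) (h1 : pos ≠ 1) (h2 : pos ≠ 2) (h3 : pos ≠ 3)
    (prev : List (List Int)) : shiftA pos prev = [] := by
  simp [shiftA, h0, h1, h2, h3]

theorem foldl_nilstep (pos : Int) (h0 : pos ≠ 0) (h1 : pos ≠ 1) (h2 : pos ≠ 2) (h3 : pos ≠ 3)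
    (l : List Int) (init : List (List (List Int))) :
    l.foldl (fun wave tick => wave ++ [shiftA pos (PySem.List.pyGetD wave tick [])]) init
      = init ++ List.replicate l.length [] := by
  have hfun : (fun (wave : List (List (List Int))) (tick : Int) =>
      wave ++ [shiftA pos (PySem.List.pyGetD wave tick [])]) = (fun wave _ => wave ++ [[]]) := by
    funext wave tick; rw [shiftA_other pos h0 h1 h2 h3]
  rw [hfun]
  induction l generalizing init with
  | nil => simp
  | cons a l ih =>
    rw [List.foldl_cons, ih]
    simp [List.replicate_succ]

theorem eq_other (pos dur : Int) (h0 : pos ≠ 0) (h1 : pos ≠ 1) (h2 : pos ≠ 2) (h3 : pos ≠ 3) :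
    precomputeWave pos dur = precomputeWave_alt pos dur := by
  have hc : capDurA pos dur = dur := by
    simp [capDurA, h0, h1, h2, h3]
  have hbase : baseA pos = [] := by simp [baseA, h0, h1, h2, h3]
  simp only [precomputeWave, precomputeWave_alt, hc, hbase, h0, h1, h2, h3,
    beq_iff_eq, if_false]
  rw [foldl_nilstep pos h0 h1 h2 h3]
  simp only [List.map_nil, List.map_const']
  rw [PySem.List.length_pyRange_one, PySem.List.length_pyRange_one]
  rw [List.singleton_append, ← List.replicate_succ]
  congr 1
  omega

theorem eq_pos0 (d : Int) : precomputeWave 0 d = precomputeWave_alt 0 d := by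
  simp only [precomputeWave, precomputeWave_alt, cap02 0 d (Or.inl rfl)]
  rw [main_pos 0 0 (-1) (Or.inl ⟨rfl, rfl, rfl⟩) _ base0 (min d 20)]
  simp
theorem eq_pos1 (d : Int) : precomputeWave 1 d = precomputeWave_alt 1 d := by
  simp only [precomputeWave, precomputeWave_alt, cap13 1 d (Or.inl rfl)]
  rw [main_pos 1 (-1) 0 (Or.inr (Or.inl ⟨rfl, rfl, rfl⟩)) _ base1 (min d 30)]
  simp
theorem eq_pos2 (d : Int) : precomputeWave 2 d = precomputeWave_alt 2 d := by
  simp only [precomputeWave, precomputeWave_alt, cap02 2 d (Or.inr rfl)]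
  rw [main_pos 2 0 1 (Or.inr (Or.inr (Or.inl ⟨rfl, rfl, rfl⟩))) _ base2 (min d 20)]
  simp
theorem eq_pos3 (d : Int) : precomputeWave 3 d = precomputeWave_alt 3 d := by
  simp only [precomputeWave, precomputeWave_alt, cap13 3 d (Or.inr rfl)]
  rw [main_pos 3 1 0 (Or.inr (Or.inr (Or.inr ⟨rfl, rfl, rfl⟩))) _ base3 (min d 30)]
  simp

-- ===== VERDICT (by name: the statement is the Claim_ definition above) =====
theorem precomputeWave_spec : Claim_equal_precomputeWave := by
  intro pos duration _
  unfold Spec_precomputeWave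
  by_cases h0 : pos = 0
  · subst h0; exact eq_pos0 duration
  by_cases h1 : pos = 1
  · subst h1; exact eq_pos1 duration
  by_cases h2 : pos = 2
  · subst h2; exact eq_pos2 duration
  by_cases h3 : pos = 3
  · subst h3; exact eq_pos3 duration
  · exact eq_other pos duration h0 h1 h2 h3
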